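-- pv_equiv track=rewrite | github.com/Theeo04/RAG-test | src/context.py | _compress_chunk
-- ===== SOURCE A (Python) =====
-- from typing import Dict, List, Tuple, Set
--
-- def _compress_chunk(text: str, kws: Set[str], min_lines: int = 40, max_lines: int = 220) -> str:
-- 	if not text:
-- 		return text
-- 	lines = text.splitlines()
-- 	# always keep the header lines if present
-- 	header = []
-- 	body = []
-- 	for i, ln in enumerate(lines[:3]):
-- 		if ln.startswith(("FILE:", "SECTION:", "# file:", "# score=")):
-- 			header.append(ln)
-- 	# keyword-focused filtering (case-insensitive)
-- 	kws_l = {k.lower() for k in kws}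
-- 	for ln in lines:
-- 		low = ln.lower()
-- 		if any(k in low for k in kws_l):
-- 			body.append(ln)
-- 	# if too sparse, fallback to the first N lines
-- 	if len(body) < min_lines:
-- 		body = lines[:min(max_lines, len(lines))]
-- 	# final cap
-- 	if len(body) > max_lines:
-- 		body = body[:max_lines]
-- 	return "\n".join(header + body).strip()
-- ===== SOURCE B (Python) =====
-- def _compress_chunk(text, kws, min_lines=40, max_lines=220):
--     # Position-driven multi-pattern matcher instead of keyword-driven repeated
--     # substring scans: lowered keywords are bucketed by first character in a dict,
--     # then each (lowered) line is scanned once position by position, probing only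
--     # the keywords bucketed under the character at that position.
--     if not text:
--         return text
--     lines = text.splitlines()
--     header = [ln for ln in lines[:3]
--               if ln.startswith(("FILE:", "SECTION:", "# file:", "# score="))]
--     buckets = {}
--     has_empty = False
--     for k in kws:
--         kl = k.lower()
--         if kl:
--             buckets.setdefault(kl[0], []).append(kl)
--         else:
--             has_empty = True  # the empty keyword is a substring of every line
--
--     def matches(ln):
--         if has_empty:
--             return True
--         low = ln.lower()
--         for i, c in enumerate(low):
--             for p in buckets.get(c, ()):
--                 if low.startswith(p, i):
--                     return True
--         return False
--
--     body = [ln for ln in lines if matches(ln)]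
--     if len(body) < min_lines:
--         body = lines[:max_lines]
--     return "\n".join(header + body[:max_lines]).strip()
-- ===== Notes on version B (the rewrite author's own statement) =====
-- stated objective: alternative
-- what changed: B replaces A's keyword-driven matching (for each line, run 'k in line' once per keyword) by a position-driven multi-pattern matcher: lowered keywords are bucketed by first character in a dict built once, and each line is scanned position by position, probing only the patterns bucketed under the current character.
import Mathlib
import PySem

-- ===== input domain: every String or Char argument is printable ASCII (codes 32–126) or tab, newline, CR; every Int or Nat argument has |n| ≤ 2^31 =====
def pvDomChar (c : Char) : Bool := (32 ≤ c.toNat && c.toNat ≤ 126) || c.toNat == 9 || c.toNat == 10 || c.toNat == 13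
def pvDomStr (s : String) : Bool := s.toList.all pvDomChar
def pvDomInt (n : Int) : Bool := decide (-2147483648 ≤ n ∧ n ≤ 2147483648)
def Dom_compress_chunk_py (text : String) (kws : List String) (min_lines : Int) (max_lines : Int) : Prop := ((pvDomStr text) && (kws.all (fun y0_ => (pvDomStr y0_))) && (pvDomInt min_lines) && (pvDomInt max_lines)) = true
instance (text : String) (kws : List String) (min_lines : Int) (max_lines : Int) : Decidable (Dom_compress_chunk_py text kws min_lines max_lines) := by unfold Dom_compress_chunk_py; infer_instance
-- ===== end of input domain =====

-- B replaces A's keyword-driven matching (each line tested with 'k in line' once per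
-- keyword) by a position-driven multi-pattern matcher: lowered keywords bucketed by
-- first character in a dict, each line scanned once position by position; same value.

-- ===== PORT A =====
-- ln.startswith(("FILE:", "SECTION:", "# file:", "# score="))
def pvHeadPrefA (ln : String) : Bool :=
  PySem.Str.startswith ln "FILE:" || PySem.Str.startswith ln "SECTION:" ||
  PySem.Str.startswith ln "# file:" || PySem.Str.startswith ln "# score="

def compress_chunk_py (text : String) (kws : List String) (min_lines : Int) (max_lines : Int) : String :=
  if text = "" then text
  else
    let lines := PySem.Str.splitlines text
    -- for i, ln in enumerate(lines[:3]): if ln.startswith(...): header.append(ln)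
    let header := (PySem.List.enumerate (PySem.List.slice lines none (some 3)) 0).foldl
        (fun acc p => if pvHeadPrefA p.2 then acc ++ [p.2] else acc) []
    -- kws_l = {k.lower() for k in kws}
    let kws_l : PySem.Set String := PySem.Set.ofList (kws.map PySem.Str.lower)
    -- for ln in lines: if any(k in low for k in kws_l): body.append(ln)
    let body := lines.foldl
        (fun acc ln => if kws_l.any (fun k => PySem.Str.isIn k (PySem.Str.lower ln)) then acc ++ [ln] else acc) []
    let body := if PySem.List.len body < min_lines then
        PySem.List.slice lines none (some (min max_lines (PySem.List.len lines))) else body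
    let body := if max_lines < PySem.List.len body then PySem.List.slice body none (some max_lines) else body
    PySem.Str.strip (PySem.Str.join "\n" (header ++ body))

-- ===== PORT B =====
-- the startswith-tuple test of Source B's header comprehension
def pvHeadPrefB (ln : String) : Bool :=
  ["FILE:", "SECTION:", "# file:", "# score="].any (fun p => PySem.Str.startswith ln p)

-- one step of Source B's bucket-building loop: state = (buckets, has_empty);
-- 'buckets.setdefault(kl[0], []).append(kl)' = modify at kl[0] with default [] appending kl
def pvBucketStep (s : PySem.Dict Char (List (List Char)) × Bool) (k : String) :
    PySem.Dict Char (List (List Char)) × Bool :=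
  let kl := PySem.Chars.lower k.toList
  if h : kl = [] then (s.1, true)
  else (s.1.modify (kl.head h) [] (· ++ [kl]), s.2)

-- def matches(ln): position-driven scan of the lowered line, probing the bucket of the
-- character at each position; low.startswith(p, i) is exact as a prefix test on low.drop i
-- since enumerate only yields 0 ≤ i < len(low)
def pvMatches (buckets : PySem.Dict Char (List (List Char))) (hasEmpty : Bool) (ln : String) : Bool :=
  if hasEmpty then true
  else
    let low := PySem.Chars.lower ln.toList
    (PySem.List.enumerate low 0).any (fun p =>
      (buckets.getD p.2 []).any (fun pat => PySem.Chars.startswith (low.drop p.1.toNat) pat))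

def compress_chunk_py_alt (text : String) (kws : List String) (min_lines : Int) (max_lines : Int) : String :=
  if text = "" then text
  else
    let lines := PySem.Str.splitlines text
    -- header = [ln for ln in lines[:3] if ln.startswith((...))]
    let header := (PySem.List.slice lines none (some 3)).filter pvHeadPrefB
    -- for k in kws: build (buckets, has_empty)
    let be := kws.foldl pvBucketStep (PySem.Dict.empty, false)
    -- body = [ln for ln in lines if matches(ln)]
    let body := lines.filter (pvMatches be.1 be.2)
    let body := if PySem.List.len body < min_lines then PySem.List.slice lines none (some max_lines) else body
    PySem.Str.strip (PySem.Str.join "\n" (header ++ PySem.List.slice body none (some max_lines)))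

-- ===== PRECONDITION & SPEC =====
def Spec_compress_chunk_py (text : String) (kws : List String) (min_lines : Int) (max_lines : Int) (out : String) : Prop := out = compress_chunk_py_alt text kws min_lines max_lines
instance (text : String) (kws : List String) (min_lines : Int) (max_lines : Int) (out : String) : Decidable (Spec_compress_chunk_py text kws min_lines max_lines out) := by unfold Spec_compress_chunk_py; infer_instance

-- ===== CLAIM =====
def Claim_equal_compress_chunk_py : Prop := ∀ (text : String) (kws : List String) (min_lines : Int) (max_lines : Int), Dom_compress_chunk_py text kws min_lines max_lines → Spec_compress_chunk_py text kws min_lines max_lines (compress_chunk_py text kws min_lines max_lines)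

-- ===== LEMMAS AND PROOFS =====

-- the two prefix tests are the same Boolean function
theorem pvHeadPref_eq : pvHeadPrefA = pvHeadPrefB := by
  funext ln
  simp [pvHeadPrefA, pvHeadPrefB, List.any, Bool.or_assoc]

-- any over the deduplicated set equals any over the underlying list
theorem pvSetAny_eq (l : List String) (q : String → Bool) :
    (PySem.Set.ofList l : List String).any q = l.any q := by
  rcases h : l.any q with _ | _
  · rw [List.any_eq_false] at h ⊢
    intro x hx
    exact h x ((PySem.Set.mem_ofList l x).mp hx)
  · rw [List.any_eq_true] at h ⊢
    obtain ⟨x, hx, hq⟩ := h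
    exact ⟨x, (PySem.Set.mem_ofList l x).mpr hx, hq⟩

-- characterisation of Source B's bucket-building loop: the flag records an empty lowered
-- keyword, and bucket c holds exactly the lowered keywords whose first char is c, in order
theorem pvBuild (kws : List String) (d : PySem.Dict Char (List (List Char))) (e : Bool) :
    (kws.foldl pvBucketStep (d, e)).2
        = (e || kws.any (fun k => PySem.Chars.lower k.toList == ([] : List Char)))
    ∧ ∀ c, (kws.foldl pvBucketStep (d, e)).1.getD c []
        = d.getD c [] ++ (kws.map (fun k => PySem.Chars.lower k.toList)).filter
            (fun kl => kl.head? == some c) := by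
  induction kws generalizing d e with
  | nil => simp
  | cons k t ih =>
    rw [List.foldl_cons]
    by_cases h : PySem.Chars.lower k.toList = []
    · have hs : pvBucketStep (d, e) k = (d, true) := by simp [pvBucketStep, h]
      rw [hs]
      refine ⟨?_, ?_⟩
      · rw [(ih d true).1]; simp [h]
      · intro c
        rw [(ih d true).2 c]
        simp [h]
    · have hs : pvBucketStep (d, e) k
          = (d.modify ((PySem.Chars.lower k.toList).head h) [] (· ++ [PySem.Chars.lower k.toList]), e) := by
        simp [pvBucketStep, h]
      rw [hs]
      refine ⟨?_, ?_⟩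
      · rw [(ih _ e).1]
        have hie : (PySem.Chars.lower k.toList).isEmpty = false := by
          cases hie : (PySem.Chars.lower k.toList).isEmpty
          · rfl
          · exact absurd (List.isEmpty_iff.mp hie) h
        simp [hie]
      · intro c
        rw [(ih _ e).2 c]
        rw [PySem.Dict.getD_modify]
        rw [List.map_cons, List.filter_cons]
        by_cases hc : c = (PySem.Chars.lower k.toList).head h
        · simp [hc, List.head?_eq_some_head h]
        · have hh : ¬ ((PySem.Chars.lower k.toList).head? == some c) = true := by
            rw [List.head?_eq_some_head h]; simp; exact fun hh' => hc hh'.symm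
          simp [hc, hh]

-- a nonempty prefix of low.drop j fixes low[j] to its head
theorem pvHeadAt (low pat : List Char) (j : Nat) (hp : pat <+: low.drop j) (hne : pat ≠ [])
    (hj : j < low.length) : pat.head? = some low[j] := by
  obtain ⟨x, xs, rfl⟩ := List.exists_cons_of_ne_nil hne
  obtain ⟨t, ht⟩ := hp
  have h1 : (low.drop j).head? = some low[j] := by
    rw [List.head?_drop]; simp [hj]
  rw [← ht] at h1
  simpa using h1

-- the two per-line match tests agree: A's any-substring test = B's bucketed position scan
theorem pvMatch_eq (kws : List String) (ln : String) :
    (PySem.Set.ofList (kws.map PySem.Str.lower) : List String).any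
        (fun k => PySem.Str.isIn k (PySem.Str.lower ln))
      = pvMatches (kws.foldl pvBucketStep (PySem.Dict.empty, false)).1
          (kws.foldl pvBucketStep (PySem.Dict.empty, false)).2 ln := by
  obtain ⟨he, hb⟩ := pvBuild kws PySem.Dict.empty false
  set low := PySem.Chars.lower ln.toList with hlow
  have hA : (PySem.Set.ofList (kws.map PySem.Str.lower) : List String).any
        (fun k => PySem.Str.isIn k (PySem.Str.lower ln))
      = kws.any (fun k => PySem.Chars.isIn (PySem.Chars.lower k.toList) low) := by
    rw [pvSetAny_eq, List.any_map]
    apply PySem.List.any_congr_mem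
    intro k _
    simp [PySem.Str.isIn, PySem.Str.lower, hlow]
  rw [hA]
  by_cases hemp : kws.any (fun k => PySem.Chars.lower k.toList == ([] : List Char)) = true
  · -- some keyword lowers to "": both sides are true
    have hR : pvMatches (kws.foldl pvBucketStep (PySem.Dict.empty, false)).1
        (kws.foldl pvBucketStep (PySem.Dict.empty, false)).2 ln = true := by
      rw [pvMatches, he, hemp]; simp
    rw [hR]
    rw [List.any_eq_true] at hemp ⊢
    obtain ⟨k, hk, hkl⟩ := hemp
    refine ⟨k, hk, ?_⟩
    rw [beq_iff_eq] at hkl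
    rw [hkl, PySem.Chars.isIn_iff_infix]
    exact List.nil_infix
  · -- all lowered keywords nonempty
    have hnemp : ∀ k ∈ kws, PySem.Chars.lower k.toList ≠ [] := by
      intro k hk hkl
      exact hemp (List.any_eq_true.mpr ⟨k, hk, by simp [hkl]⟩)
    have heF : (kws.foldl pvBucketStep (PySem.Dict.empty, false)).2 = false := by
      rw [he]; simpa using hemp
    rw [pvMatches, heF, if_neg (by simp), ← hlow]
    rcases hL : kws.any (fun k => PySem.Chars.isIn (PySem.Chars.lower k.toList) low) with _ | _
    · -- no keyword matches: the scan finds nothing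
      rw [List.any_eq_false] at hL
      symm
      rw [List.any_eq_false]
      intro p hp
      rw [PySem.List.mem_enumerate_iff] at hp
      obtain ⟨j, hj, hpj⟩ := hp
      subst hpj
      intro hany
      rw [List.any_eq_true] at hany
      obtain ⟨pat, hpat, hsw⟩ := hany
      dsimp only at hpat hsw
      rw [hb, PySem.Dict.getD_empty, List.nil_append] at hpat
      rw [List.mem_filter] at hpat
      obtain ⟨hpat1, hpat2⟩ := hpat
      rw [List.mem_map] at hpat1
      obtain ⟨k, hk, hkpat⟩ := hpat1
      rw [PySem.Chars.startswith_iff] at hsw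
      have hin : PySem.Chars.isIn (PySem.Chars.lower k.toList) low = true := by
        rw [← PySem.Chars.exists_prefix_drop_iff_isIn]
        exact ⟨((0 : Int) + (j : Int)).toNat, by rw [hkpat]; exact hsw⟩
      exact absurd hin (by simp [hL k hk])
    · -- some keyword matches: the scan finds it at its match position
      rw [List.any_eq_true] at hL
      obtain ⟨k, hk, hkin⟩ := hL
      rw [← PySem.Chars.exists_prefix_drop_iff_isIn] at hkin
      obtain ⟨j, hj⟩ := hkin
      have hjlt : j < low.length := by
        by_contra hge
        rw [List.drop_eq_nil_of_le (by omega)] at hj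
        exact hnemp k hk (List.prefix_nil.mp hj)
      symm
      rw [List.any_eq_true]
      refine ⟨((0 : Int) + (j : Int), low[j]), ?_, ?_⟩
      · rw [PySem.List.mem_enumerate_iff]
        exact ⟨j, hjlt, rfl⟩
      · simp only [List.any_eq_true]
        refine ⟨PySem.Chars.lower k.toList, ?_, ?_⟩
        · rw [hb, PySem.Dict.getD_empty, List.nil_append, List.mem_filter]
          refine ⟨List.mem_map.mpr ⟨k, hk, rfl⟩, ?_⟩
          rw [pvHeadAt low _ j hj (hnemp k hk) hjlt]
          exact beq_self_eq_true _
        · rw [PySem.Chars.startswith_iff]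
          simpa using hj

-- xs[:min(m, len(xs))] = xs[:m]
theorem pvSliceMin (xs : List String) (m : Int) :
    PySem.List.slice xs none (some (min m (PySem.List.len xs))) = PySem.List.slice xs none (some m) := by
  by_cases hle : m ≤ PySem.List.len xs
  · rw [min_eq_left hle]
  · have hlt : PySem.List.len xs < m := lt_of_not_ge hle
    rw [min_eq_right hlt.le]
    have h0 : (0 : Int) ≤ PySem.List.len xs := by simp [PySem.List.len_eq]
    rw [PySem.List.slice_to xs h0, PySem.List.slice_to xs (le_trans h0 hlt.le)]
    have hlen : xs.length ≤ m.toNat := by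
      simp [PySem.List.len_eq] at hlt; omega
    simp [PySem.List.len_eq, List.take_of_length_le hlen]

-- the guarded final cap equals the unconditional clamped slice
theorem pvCap (xs : List String) (m : Int) :
    (if m < PySem.List.len xs then PySem.List.slice xs none (some m) else xs)
      = PySem.List.slice xs none (some m) := by
  split
  · rfl
  · rename_i hle
    have h1 : (xs.length : Int) ≤ m := by simp [PySem.List.len_eq] at hle; omega
    have h0 : (0 : Int) ≤ m := le_trans (by positivity) h1
    rw [PySem.List.slice_to xs h0, List.take_of_length_le (by omega)]

-- A's enumerated header loop is a filter
theorem pvHeadFold (l : List (Int × String)) (acc : List String) :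
    l.foldl (fun acc p => if pvHeadPrefA p.2 then acc ++ [p.2] else acc) acc
      = acc ++ (l.map (fun p => p.2)).filter pvHeadPrefA := by
  rw [PySem.List.foldl_append_if (fun p => pvHeadPrefA p.2) (fun p => p.2) l acc, List.filter_map]
  rfl

-- ===== VERDICT =====
theorem compress_chunk_py_spec : Claim_equal_compress_chunk_py := by
  intro text kws min_lines max_lines _
  unfold Spec_compress_chunk_py compress_chunk_py compress_chunk_py_alt
  by_cases ht : text = ""
  · simp [ht]
  · simp only [if_neg ht]
    set lines := PySem.Str.splitlines text with hl
    -- header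
    rw [pvHeadFold, PySem.List.map_snd_enumerate, List.nil_append, pvHeadPref_eq]
    -- body loop of A is a filter, whose test equals B's matcher
    rw [PySem.List.foldl_append_if_eq_filter, List.nil_append]
    have hfilt : lines.filter
        (fun ln => (PySem.Set.ofList (kws.map PySem.Str.lower) : List String).any
          (fun k => PySem.Str.isIn k (PySem.Str.lower ln)))
        = lines.filter (pvMatches (kws.foldl pvBucketStep (PySem.Dict.empty, false)).1
            (kws.foldl pvBucketStep (PySem.Dict.empty, false)).2) := by
      apply List.filter_congr
      intro ln _
      exact pvMatch_eq kws ln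
    rw [hfilt, pvSliceMin, pvCap]
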